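-- pv_equiv track=rewrite | github.com/cyberbotics/webots | scripts/robot_component_studio/controllers/robot_component_supervisor/robot_component_supervisor.py | _compareDevice
-- ===== SOURCE A (Python) =====
-- def _compareDevice(d1, d2):
--     priortyDeviceTypes = ['RotationalMotor', 'LinearMotor', 'LED']  # Device types appearing first.
--     for priortyDeviceType in priortyDeviceTypes:
--         if d1['type'] == priortyDeviceType and d2['type'] == priortyDeviceType:
--             return cmp(d1['name'].lower(), d2['name'].lower())
--         elif d1['type'] == priortyDeviceType:
--             return -1
--         elif d2['type'] == priortyDeviceType:
--             return 1
--     return cmp(d1['name'].lower(), d2['name'].lower())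
-- ===== SOURCE B (Python) =====
-- _PRIORITY = ['RotationalMotor', 'LinearMotor', 'LED']
--
--
-- def _rank(t):
--     return _PRIORITY.index(t) if t in _PRIORITY else len(_PRIORITY)
--
--
-- def _compareDevice(d1, d2):
--     r1 = _rank(d1['type'])
--     r2 = _rank(d2['type'])
--     if r1 != r2:
--         return -1 if r1 < r2 else 1
--     return cmp(d1['name'].lower(), d2['name'].lower())
-- ===== Notes on version B (the rewrite author's own statement) =====
-- stated objective: simpler
-- what changed: Replaces A's interleaved per-priority-type branch loop by a rank-then-compare shape: each device gets an integer rank from the priority list and ranks are compared first, names (lowercased) only on equal rank.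
import Mathlib
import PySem

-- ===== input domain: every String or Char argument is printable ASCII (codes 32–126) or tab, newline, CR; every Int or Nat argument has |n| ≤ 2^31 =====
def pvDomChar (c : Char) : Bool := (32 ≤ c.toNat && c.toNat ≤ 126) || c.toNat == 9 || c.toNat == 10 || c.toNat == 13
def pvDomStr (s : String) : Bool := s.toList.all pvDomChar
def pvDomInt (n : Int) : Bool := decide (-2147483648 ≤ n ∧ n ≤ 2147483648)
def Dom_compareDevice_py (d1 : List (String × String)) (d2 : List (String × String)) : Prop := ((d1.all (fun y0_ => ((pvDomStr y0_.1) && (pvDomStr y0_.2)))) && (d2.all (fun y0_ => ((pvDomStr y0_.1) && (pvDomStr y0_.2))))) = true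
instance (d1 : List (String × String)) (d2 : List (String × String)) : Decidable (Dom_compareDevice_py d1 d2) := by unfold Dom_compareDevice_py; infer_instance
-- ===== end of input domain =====

-- B replaces A's interleaved per-priority-type branch loop by a rank-then-compare
-- decomposition (objective: simpler); same O(1) cost.

-- d[k] for these string dicts; the default "" is unreachable under Pre_ (which
-- requires exactly the keys Python's d[k] accesses to be present).
def pvGetS (d : List (String × String)) (k : String) : String :=
  (List.lookup k d).getD ""

-- Python 2 cmp(a, b) on strings (-1 / 0 / 1, code-point lexicographic).
def pvCmpStr (a b : String) : Int :=
  if a < b then -1 else if b < a then 1 else 0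

-- ===== PORT A =====
-- cmp(d1['name'].lower(), d2['name'].lower())
def cmpNamesA (d1 d2 : List (String × String)) : Int :=
  pvCmpStr (PySem.Str.lower (pvGetS d1 "name")) (PySem.Str.lower (pvGetS d2 "name"))

-- the 'for priortyDeviceType in priortyDeviceTypes' loop with its early returns
def aLoop (d1 d2 : List (String × String)) : List String → Int
  | [] => cmpNamesA d1 d2
  | p :: ps =>
    if pvGetS d1 "type" = p ∧ pvGetS d2 "type" = p then cmpNamesA d1 d2
    else if pvGetS d1 "type" = p then -1
    else if pvGetS d2 "type" = p then 1
    else aLoop d1 d2 ps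

def compareDevice_py (d1 : List (String × String)) (d2 : List (String × String)) : Int :=
  aLoop d1 d2 ["RotationalMotor", "LinearMotor", "LED"]

-- ===== PORT B =====
-- _rank(t) = _PRIORITY.index(t) if t in _PRIORITY else len(_PRIORITY)
def rankB (t : String) : Int :=
  if t ∈ ["RotationalMotor", "LinearMotor", "LED"] then
    ((PySem.List.index? ["RotationalMotor", "LinearMotor", "LED"] t).getD 0 : Nat)
  else (3 : Nat)

def compareDevice_py_alt (d1 : List (String × String)) (d2 : List (String × String)) : Int :=
  let r1 := rankB (pvGetS d1 "type")
  let r2 := rankB (pvGetS d2 "type")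
  if r1 ≠ r2 then (if r1 < r2 then -1 else 1)
  else pvCmpStr (PySem.Str.lower (pvGetS d1 "name")) (PySem.Str.lower (pvGetS d2 "name"))

-- ===== PRECONDITION & SPEC =====
-- Pre_ excludes exactly the inputs where the Python raises KeyError: 'type'
-- missing in either dict, or — when the two types tie in priority rank, i.e.
-- they are equal or both outside the priority list — 'name' missing in either.
def Pre_compareDevice_py (d1 : List (String × String)) (d2 : List (String × String)) : Prop :=
  (List.lookup "type" d1).isSome = true ∧ (List.lookup "type" d2).isSome = true ∧
  ((((List.lookup "type" d1).getD "" = (List.lookup "type" d2).getD "") ∨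
    ((List.lookup "type" d1).getD "" ∉ (["RotationalMotor", "LinearMotor", "LED"] : List String) ∧
     (List.lookup "type" d2).getD "" ∉ (["RotationalMotor", "LinearMotor", "LED"] : List String))) →
   (List.lookup "name" d1).isSome = true ∧ (List.lookup "name" d2).isSome = true)

instance (d1 : List (String × String)) (d2 : List (String × String)) : Decidable (Pre_compareDevice_py d1 d2) := by
  unfold Pre_compareDevice_py; infer_instance

def pvWitness_compareDevice_py : (List (String × String)) × (List (String × String)) :=
  ([("type", "LED"), ("name", "a")], [("type", "Camera"), ("name", "B")])

def Spec_compareDevice_py (d1 : List (String × String)) (d2 : List (String × String)) (out : Int) : Prop := out = compareDevice_py_alt d1 d2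
instance (d1 : List (String × String)) (d2 : List (String × String)) (out : Int) : Decidable (Spec_compareDevice_py d1 d2 out) := by unfold Spec_compareDevice_py; infer_instance

-- ===== CLAIM (what is proved, stated in full; the proofs are below) =====
def Claim_equal_compareDevice_py : Prop := ∀ (d1 : List (String × String)) (d2 : List (String × String)), Dom_compareDevice_py d1 d2 → Pre_compareDevice_py d1 d2 → Spec_compareDevice_py d1 d2 (compareDevice_py d1 d2)

-- ===== LEMMAS AND PROOFS =====

theorem rankB_cases (t : String) :
    rankB t = if t = "RotationalMotor" then 0 else if t = "LinearMotor" then 1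
              else if t = "LED" then 2 else 3 := by
  by_cases h1 : t = "RotationalMotor" <;> by_cases h2 : t = "LinearMotor" <;>
  by_cases h3 : t = "LED" <;>
  simp_all [rankB, PySem.List.index?_eq_idxOf?, List.idxOf?, List.findIdx?, List.findIdx?.go]

theorem compareDevice_py_eq_alt (d1 d2 : List (String × String)) :
    compareDevice_py d1 d2 = compareDevice_py_alt d1 d2 := by
  simp only [compareDevice_py, compareDevice_py_alt, aLoop, cmpNamesA, rankB_cases]
  by_cases h1 : pvGetS d1 "type" = "RotationalMotor" <;>
  by_cases h2 : pvGetS d2 "type" = "RotationalMotor" <;>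
  by_cases h3 : pvGetS d1 "type" = "LinearMotor" <;>
  by_cases h4 : pvGetS d2 "type" = "LinearMotor" <;>
  by_cases h5 : pvGetS d1 "type" = "LED" <;>
  by_cases h6 : pvGetS d2 "type" = "LED" <;>
  simp_all

-- ===== VERDICT (by name: the statement is the Claim_ definition above) =====
theorem compareDevice_py_spec : Claim_equal_compareDevice_py := by
  intro d1 d2 _ _
  exact compareDevice_py_eq_alt d1 d2
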